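-- pv_equiv track=rewrite | github.com/Jongwon0280/AlgorithmStudy | Programmers/마법의엘레베이터.py | solution
-- ===== SOURCE A (Python) =====
-- def solution(storey):
--     a=storey
--     length=len(str(a))
--     num=list(str(a))
--     cnt =0
--     up=0
--     for i in range(length-1,-1,-1):
--         comp = int(num[i]) +up
--         up=0
--
--         if(comp>5):
--             cnt=cnt+(10-comp)
--             up=1
--
--         elif(comp<5):
--             cnt=cnt+comp
--         else:
--             if(i-1!=-1):
--
--                 if(int(num[i-1])>=5):
--                     up=1
--                 else:
--                     up=0
--             cnt=cnt+5
--
--     if(up==1):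
--         cnt=cnt+1
--     return cnt
-- ===== SOURCE B (Python) =====
-- def solution(storey):
--     cnt = 0
--     while storey:
--         storey, r = divmod(storey, 10)
--         if r > 5 or (r == 5 and storey % 10 >= 5):
--             cnt += 10 - r
--             storey += 1
--         else:
--             cnt += r
--     return cnt
-- ===== Notes on version B (the rewrite author's own statement) =====
-- stated objective: simpler
-- what changed: B drops the str()/list() digit-string conversion, the index for-loop and the separate carry flag, and instead runs a plain divmod loop on the number itself, folding the carry into the remaining number (storey // 10 + 1).
import Mathlib
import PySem

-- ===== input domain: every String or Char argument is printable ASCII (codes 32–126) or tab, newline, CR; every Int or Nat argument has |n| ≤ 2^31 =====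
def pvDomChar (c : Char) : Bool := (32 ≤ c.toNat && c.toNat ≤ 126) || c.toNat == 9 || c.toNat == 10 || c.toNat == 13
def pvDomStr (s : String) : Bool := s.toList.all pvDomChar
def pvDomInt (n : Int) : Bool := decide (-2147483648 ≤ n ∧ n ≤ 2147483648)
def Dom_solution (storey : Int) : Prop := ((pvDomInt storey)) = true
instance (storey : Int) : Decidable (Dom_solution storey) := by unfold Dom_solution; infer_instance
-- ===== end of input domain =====

-- B replaces A's string/digit-list loop with a plain divmod loop on the number (simpler decomposition).
-- Equivalence is about the return value only (A mutates nothing).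

-- ===== PORT A =====
-- loop body of A's 'for i in range(length-1,-1,-1)'; state = (cnt, up).
-- int(num[i]) is PySem.Int.ofChars? [c]; the '.getD 0' is exact under Pre_ (every char is then a digit,
-- so ofChars? is 'some'; on negative storey Python raises ValueError and Pre_ excludes it).
def pvStepA (num : List Char) (s : Int × Int) (i : Int) : Int × Int :=
  let comp := (PySem.Int.ofChars? [PySem.List.pyGetD num i ' ']).getD 0 + s.2
  if comp > 5 then (s.1 + (10 - comp), 1)
  else if comp < 5 then (s.1 + comp, 0)
  else
    (s.1 + 5,
      if i - 1 ≠ -1 then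
        (if (PySem.Int.ofChars? [PySem.List.pyGetD num (i - 1) ' ']).getD 0 ≥ 5 then 1 else 0)
      else 0)  -- Python reset up to 0 just above; it stays 0 here

def solution (storey : Int) : Int :=
  let a := storey
  let num := PySem.Int.toChars a
  let length := PySem.List.len num
  let res := (PySem.List.pyRange (length - 1) (-1) (-1)).foldl (pvStepA num) (0, 0)
  if res.2 = 1 then res.1 + 1 else res.1

-- ===== PORT B =====
-- the 'while storey:' loop of Source B
def pvLoopB (storey cnt : Int) : Int :=
  if _h : storey = 0 then cnt
  else
    let q := PySem.Int.floordiv storey 10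
    let r := PySem.Int.mod storey 10
    if r > 5 ∨ (r = 5 ∧ PySem.Int.mod q 10 ≥ 5) then pvLoopB (q + 1) (cnt + (10 - r))
    else pvLoopB q (cnt + r)
termination_by storey.natAbs
decreasing_by
  · have hd := PySem.Int.floordiv_eq_ediv_of_pos (a := storey) (show (0:Int) < 10 by norm_num)
    have hm := PySem.Int.mod_eq_emod_of_pos (a := storey) (show (0:Int) < 10 by norm_num)
    simp only [q, r, hd, hm] at *
    omega
  · have hd := PySem.Int.floordiv_eq_ediv_of_pos (a := storey) (show (0:Int) < 10 by norm_num)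
    have hm := PySem.Int.mod_eq_emod_of_pos (a := storey) (show (0:Int) < 10 by norm_num)
    simp only [q, r, hd, hm] at *
    omega

def solution_alt (storey : Int) : Int := pvLoopB storey 0

-- ===== PRECONDITION & SPEC =====
-- A raises ValueError on negative storey (int('-') on the sign character); Pre_ keeps the natural domain.
def Pre_solution (storey : Int) : Prop := 0 ≤ storey
instance (storey : Int) : Decidable (Pre_solution storey) := by unfold Pre_solution; infer_instance
def pvWitness_solution : Int := 2554


def Spec_solution (storey : Int) (out : Int) : Prop := out = solution_alt storey
instance (storey : Int) (out : Int) : Decidable (Spec_solution storey out) := by unfold Spec_solution; infer_instance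

-- ===== CLAIM (what is proved, stated in full; the proofs are below) =====
def Claim_equal_solution : Prop := ∀ (storey : Int), Dom_solution storey → Pre_solution storey → Spec_solution storey (solution storey)

-- ===== LEMMAS AND PROOFS =====

-- digit value of one char, as A's loop reads it
def pvVal (c : Char) : Int := (PySem.Int.ofChars? [c]).getD 0

-- A's loop, rephrased over the list of digit VALUES, least-significant first
def pvLoopA : List Int → Int → Int → Int
  | [], up, cnt => if up = 1 then cnt + 1 else cnt
  | d :: rest, up, cnt =>
    let comp := d + up
    if comp > 5 then pvLoopA rest 1 (cnt + (10 - comp))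
    else if comp < 5 then pvLoopA rest 0 (cnt + comp)
    else pvLoopA rest (match rest with | [] => 0 | d' :: _ => if d' ≥ 5 then 1 else 0) (cnt + 5)

-- value of an LSB-first digit list
def pvValList : List Int → Int
  | [] => 0
  | d :: rest => d + 10 * pvValList rest

lemma pvValList_nonneg (rs : List Int) (h : ∀ d ∈ rs, 0 ≤ d ∧ d < 10) : 0 ≤ pvValList rs := by
  induction rs with
  | nil => simp [pvValList]
  | cons d rest ih =>
    have hd := h d (by simp)
    have := ih (fun x hx => h x (by simp [hx]))
    simp only [pvValList]
    omega

lemma pvLoopB_zero (cnt : Int) : pvLoopB 0 cnt = cnt := by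
  rw [pvLoopB]
  simp

lemma pvLoopB_pos (n cnt : Int) (h : n ≠ 0) :
    pvLoopB n cnt =
      if n % 10 > 5 ∨ (n % 10 = 5 ∧ (n / 10) % 10 ≥ 5) then
        pvLoopB (n / 10 + 1) (cnt + (10 - n % 10))
      else pvLoopB (n / 10) (cnt + n % 10) := by
  rw [pvLoopB]
  simp only [h, dite_false,
    PySem.Int.floordiv_eq_ediv_of_pos (show (0:Int) < 10 by norm_num),
    PySem.Int.mod_eq_emod_of_pos (show (0:Int) < 10 by norm_num)]

-- L2: A's value-level loop equals B's divmod loop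
lemma pvLoopA_eq_pvLoopB (rs : List Int) : ∀ (up cnt : Int),
    (∀ d ∈ rs, 0 ≤ d ∧ d < 10) → (up = 0 ∨ up = 1) →
    pvLoopA rs up cnt = pvLoopB (pvValList rs + up) cnt := by
  induction rs with
  | nil =>
    intro up cnt _ hup
    rcases hup with rfl | rfl
    · simp [pvLoopA, pvValList, pvLoopB_zero]
    · have h1 : pvLoopB (pvValList [] + 1) cnt = pvLoopB 0 (cnt + 1) := by
        rw [show pvValList [] + 1 = (1:Int) from by simp [pvValList],
          pvLoopB_pos 1 cnt (by norm_num)]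
        norm_num
      rw [h1, pvLoopB_zero]
      simp [pvLoopA]
  | cons d rest ih =>
    intro up cnt hb hup
    have hd0 := hb d (List.mem_cons_self ..)
    have hbr : ∀ x ∈ rest, 0 ≤ x ∧ x < 10 := fun x hx => hb x (List.mem_cons_of_mem _ hx)
    have hv := pvValList_nonneg rest hbr
    have hn : pvValList (d :: rest) + up = d + up + 10 * pvValList rest := by
      simp [pvValList]; ring
    rw [hn]
    set v := pvValList rest with hvdef
    set n := d + up + 10 * v with hndef
    by_cases h5 : d + up > 5
    · -- carry branch of A
      have hA : pvLoopA (d :: rest) up cnt = pvLoopA rest 1 (cnt + (10 - (d + up))) := by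
        simp only [pvLoopA]
        rw [if_pos h5]
      rw [hA, ih 1 (cnt + (10 - (d + up))) hbr (Or.inr rfl)]
      rw [pvLoopB_pos n cnt (by omega)]
      by_cases h10 : d + up = 10
      · have hr : n % 10 = 0 := by omega
        have hq : n / 10 = v + 1 := by omega
        rw [if_neg (by omega), hq]
        congr 1 <;> omega
      · have hr : n % 10 = d + up := by omega
        have hq : n / 10 = v := by omega
        rw [if_pos (by omega), hr, hq]
    · by_cases h5' : d + up < 5
      · -- plain branch of A
        have hA : pvLoopA (d :: rest) up cnt = pvLoopA rest 0 (cnt + (d + up)) := by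
          simp only [pvLoopA]
          rw [if_neg h5, if_pos h5']
        rw [hA, ih 0 (cnt + (d + up)) hbr (Or.inl rfl)]
        by_cases hz : n = 0
        · have : v = 0 := by omega
          rw [hz, this]
          congr 1 <;> omega
        · rw [pvLoopB_pos n cnt hz]
          have hr : n % 10 = d + up := by omega
          have hq : n / 10 = v := by omega
          rw [if_neg (by omega), hr, hq]
          congr 1 <;> omega
      · -- tie: d + up = 5
        have h5e : d + up = 5 := by omega
        have hr : n % 10 = 5 := by omega
        have hq : n / 10 = v := by omega
        rw [pvLoopB_pos n cnt (by omega), hr, hq]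
        cases rest with
        | nil =>
          have hv0 : v = 0 := by simp [hvdef, pvValList]
          have hA : pvLoopA (d :: []) up cnt = pvLoopA [] 0 (cnt + 5) := by
            simp only [pvLoopA]
            rw [if_neg h5, if_neg (by omega)]
          rw [hA, ih 0 (cnt + 5) (by simp) (Or.inl rfl), if_neg (by omega)]
          congr 1
        | cons d' r' =>
          have hd' := hbr d' (List.mem_cons_self ..)
          have hvm : v % 10 = d' := by
            have : v = d' + 10 * pvValList r' := by simp [hvdef, pvValList]
            have h2 := pvValList_nonneg r' (fun x hx => hbr x (List.mem_cons_of_mem _ hx))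
            omega
          by_cases hge : d' ≥ 5
          · have hA : pvLoopA (d :: d' :: r') up cnt = pvLoopA (d' :: r') 1 (cnt + 5) := by
              simp only [pvLoopA]
              rw [if_neg h5, if_neg (by omega), if_pos hge]
            rw [hA, ih 1 (cnt + 5) hbr (Or.inr rfl), if_pos (by omega)]
            congr 1
          · have hA : pvLoopA (d :: d' :: r') up cnt = pvLoopA (d' :: r') 0 (cnt + 5) := by
              simp only [pvLoopA]
              rw [if_neg h5, if_neg (by omega), if_neg hge]
            rw [hA, ih 0 (cnt + 5) hbr (Or.inl rfl), if_neg (by omega)]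
            congr 1 <;> omega

-- the post-loop 'if up == 1: cnt += 1'
def pvFinish (s : Int × Int) : Int := if s.2 = 1 then s.1 + 1 else s.1

lemma pvGetD_concat_self (xs : List Char) (x : Char) :
    PySem.List.pyGetD (xs ++ [x]) ((xs.length : Int)) ' ' = x := by
  rw [PySem.List.pyGetD_natCast]
  simp [List.getD_eq_getElem?_getD]

lemma pvGetD_append_left (xs : List Char) (x : Char) (i : Int)
    (h0 : 0 ≤ i) (h1 : i < (xs.length : Int)) :
    PySem.List.pyGetD (xs ++ [x]) i ' ' = PySem.List.pyGetD xs i ' ' := by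
  rw [PySem.List.pyGetD_of_nonneg (xs ++ [x]) ' ' h0, PySem.List.pyGetD_of_nonneg xs ' ' h0,
    List.getD_eq_getElem?_getD, List.getD_eq_getElem?_getD,
    List.getElem?_append_left (by omega)]

lemma pvStepA_append (xs : List Char) (x : Char) (s : Int × Int) (i : Int)
    (h0 : 0 ≤ i) (h1 : i < (xs.length : Int)) :
    pvStepA (xs ++ [x]) s i = pvStepA xs s i := by
  simp only [pvStepA]
  rw [pvGetD_append_left xs x i h0 h1]
  by_cases hi : i - 1 = -1
  · simp [hi]
  · rw [pvGetD_append_left xs x (i - 1) (by omega) (by omega)]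

lemma pvFold_congr (xs : List Char) (x : Char) (s : Int × Int) :
    (PySem.List.pyRange ((xs.length : Int) - 1) (-1) (-1)).foldl (pvStepA (xs ++ [x])) s
      = (PySem.List.pyRange ((xs.length : Int) - 1) (-1) (-1)).foldl (pvStepA xs) s := by
  apply PySem.List.foldl_congr_mem
  intro acc i hi
  rw [PySem.List.mem_pyRange_neg_one] at hi
  exact pvStepA_append xs x acc i (by omega) (by omega)

lemma pvLoopA_cons (d : Int) (rest : List Int) (up cnt : Int) :
    pvLoopA (d :: rest) up cnt =
      if d + up > 5 then pvLoopA rest 1 (cnt + (10 - (d + up)))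
      else if d + up < 5 then pvLoopA rest 0 (cnt + (d + up))
      else pvLoopA rest (match rest with | [] => 0 | d' :: _ => if d' ≥ 5 then 1 else 0)
        (cnt + 5) := by
  simp only [pvLoopA]

-- L1: A's index fold over the char list equals pvLoopA on the reversed digit values
lemma pvFoldA_eq_pvLoopA (num : List Char) : ∀ (cnt up : Int),
    pvFinish ((PySem.List.pyRange ((num.length : Int) - 1) (-1) (-1)).foldl (pvStepA num) (cnt, up))
      = pvLoopA (num.reverse.map pvVal) up cnt := by
  induction num using List.reverseRecOn with
  | nil =>
    intro cnt up
    rw [show ((List.length ([] : List Char) : Int)) - 1 = -1 from by simp,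
      PySem.List.pyRange_neg_one_eq_nil (by norm_num)]
    simp [pvFinish, pvLoopA]
  | append_singleton xs x ih =>
    intro cnt up
    have hlen : (((xs ++ [x]).length : Int)) - 1 = (xs.length : Int) := by simp
    rw [hlen, PySem.List.pyRange_neg_one_cons (by omega), List.foldl_cons]
    rw [show (xs ++ [x]).reverse.map pvVal = pvVal x :: xs.reverse.map pvVal from by simp]
    rw [pvLoopA_cons]
    have hfirst : pvStepA (xs ++ [x]) (cnt, up) ((xs.length : Int)) =
        if pvVal x + up > 5 then (cnt + (10 - (pvVal x + up)), 1)
        else if pvVal x + up < 5 then (cnt + (pvVal x + up), 0)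
        else (cnt + 5,
          if (xs.length : Int) - 1 ≠ -1 then
            (if pvVal (PySem.List.pyGetD (xs ++ [x]) ((xs.length : Int) - 1) ' ') ≥ 5 then 1
             else 0)
          else 0) := by
      simp [pvStepA, pvVal]
    rw [hfirst]
    by_cases h1 : pvVal x + up > 5
    · simp only [if_pos h1]
      rw [pvFold_congr]
      exact ih _ _
    · simp only [if_neg h1]
      by_cases h2 : pvVal x + up < 5
      · simp only [if_pos h2]
        rw [pvFold_congr]
        exact ih _ _
      · simp only [if_neg h2]
        rcases xs.eq_nil_or_concat' with rfl | ⟨zs, z, rfl⟩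
        · simp only [List.reverse_nil, List.map_nil]
          rw [if_neg (by norm_num)]
          rw [pvFold_congr]
          exact ih _ _
        · have hg : ((zs ++ [z]).length : Int) - 1 = (zs.length : Int) := by simp
          rw [if_pos (by rw [hg]; omega)]
          rw [show PySem.List.pyGetD ((zs ++ [z]) ++ [x]) (((zs ++ [z]).length : Int) - 1) ' ' = z from by
            rw [hg, pvGetD_append_left (zs ++ [z]) x (zs.length : Int) (by omega) (by simp),
              pvGetD_concat_self]]
          rw [show (zs ++ [z]).reverse.map pvVal = pvVal z :: zs.reverse.map pvVal from by simp]
          rw [pvFold_congr]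
          by_cases hz : pvVal z ≥ 5
          · simp only [if_pos hz]
            rw [show (pvVal z :: List.map pvVal zs.reverse) = List.map pvVal (zs ++ [z]).reverse
              from by simp]
            exact ih _ _
          · simp only [if_neg hz]
            rw [show (pvVal z :: List.map pvVal zs.reverse) = List.map pvVal (zs ++ [z]).reverse
              from by simp]
            exact ih _ _

-- L3: Nat.toDigits facts
lemma pvToDigitsCore_acc (fuel : Nat) : ∀ (n : Nat) (ds : List Char),
    Nat.toDigitsCore 10 fuel n ds = Nat.toDigitsCore 10 fuel n [] ++ ds := by
  induction fuel with
  | zero => intro n ds; simp [Nat.toDigitsCore]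
  | succ f ih =>
    intro n ds
    simp only [Nat.toDigitsCore]
    by_cases h : n / 10 = 0
    · simp [h]
    · simp only [h, ite_false]
      rw [ih (n / 10) (Nat.digitChar (n % 10) :: ds), ih (n / 10) [Nat.digitChar (n % 10)]]
      simp

lemma pvToDigitsCore_fuel (n : Nat) : ∀ (f f' : Nat), n < f → n < f' →
    Nat.toDigitsCore 10 f n [] = Nat.toDigitsCore 10 f' n [] := by
  induction n using Nat.strong_induction_on with
  | _ n ih =>
    intro f f' hf hf'
    obtain ⟨g, rfl⟩ : ∃ g, f = g + 1 := ⟨f - 1, by omega⟩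
    obtain ⟨g', rfl⟩ : ∃ g', f' = g' + 1 := ⟨f' - 1, by omega⟩
    simp only [Nat.toDigitsCore]
    by_cases h : n / 10 = 0
    · simp [h]
    · have hn : n / 10 < n := Nat.div_lt_self (by omega) (by norm_num)
      simp only [h, ite_false]
      rw [pvToDigitsCore_acc g (n / 10), pvToDigitsCore_acc g' (n / 10),
        ih (n / 10) hn g g' (by omega) (by omega)]

lemma pvToDigits_small (n : Nat) (h : n < 10) : Nat.toDigits 10 n = [Nat.digitChar n] := by
  simp [Nat.toDigits, Nat.toDigitsCore, Nat.div_eq_of_lt h, Nat.mod_eq_of_lt h]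

lemma pvToDigits_split (n : Nat) (h : 10 ≤ n) :
    Nat.toDigits 10 n = Nat.toDigits 10 (n / 10) ++ [Nat.digitChar (n % 10)] := by
  have h0 : n / 10 ≠ 0 := by omega
  have hn : n / 10 < n := Nat.div_lt_self (by omega) (by norm_num)
  conv_lhs => rw [Nat.toDigits, Nat.toDigitsCore]
  simp only [h0, ite_false]
  rw [pvToDigitsCore_acc n (n / 10), pvToDigitsCore_fuel (n / 10) n (n / 10 + 1) (by omega) (by omega)]
  rfl

lemma pvVal_digitChar (d : Nat) (h : d < 10) : pvVal (Nat.digitChar d) = (d : Int) := by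
  interval_cases d <;> decide

lemma pvDigits_ok (m : Nat) :
    (∀ d ∈ (Nat.toDigits 10 m).reverse.map pvVal, 0 ≤ d ∧ d < 10) ∧
    pvValList ((Nat.toDigits 10 m).reverse.map pvVal) = (m : Int) := by
  induction m using Nat.strong_induction_on with
  | _ m ih =>
    by_cases h : m < 10
    · rw [pvToDigits_small m h]
      refine ⟨?_, ?_⟩
      · intro d hd
        simp only [List.reverse_singleton, List.map_cons, List.map_nil, List.mem_singleton] at hd
        rw [hd, pvVal_digitChar m h]; omega
      · simp [pvValList, pvVal_digitChar m h]
    · obtain ⟨hmem, hval⟩ := ih (m / 10) (Nat.div_lt_self (by omega) (by norm_num))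
      rw [pvToDigits_split m (by omega)]
      simp only [List.reverse_append, List.reverse_singleton, List.map_cons,
        List.singleton_append, List.map_cons] at *
      refine ⟨?_, ?_⟩
      · intro d hd
        simp only [List.mem_cons] at hd
        rcases hd with rfl | hd
        · rw [pvVal_digitChar (m % 10) (Nat.mod_lt _ (by norm_num))]; omega
        · exact hmem d hd
      · simp only [pvValList, hval, pvVal_digitChar (m % 10) (Nat.mod_lt _ (by norm_num))]
        omega

-- ===== VERDICT (by name: the statement is the Claim_ definition above) =====
theorem solution_spec : Claim_equal_solution := by
  intro storey _ hpre
  have hpre' : (0:Int) ≤ storey := hpre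
  unfold Spec_solution solution solution_alt
  have hch : PySem.Int.toChars storey = Nat.toDigits 10 storey.toNat := by
    unfold PySem.Int.toChars
    rw [if_neg (by omega)]
  obtain ⟨hmem, hval⟩ := pvDigits_ok storey.toNat
  have hfin := pvFoldA_eq_pvLoopA (Nat.toDigits 10 storey.toNat) 0 0
  rw [pvLoopA_eq_pvLoopB _ 0 0 hmem (Or.inl rfl), hval, add_zero,
    Int.toNat_of_nonneg hpre'] at hfin
  simp only [pvFinish] at hfin
  simp only [hch, PySem.List.len_eq]
  exact hfin
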